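-- pv_equiv track=rewrite | github.com/elydre/myCmatter | src/tokentools.py | join_strings
-- ===== SOURCE A (Python) =====
-- def join_strings(tokens):
--     in_string = False
--     string = ''
--     pos = 0
--     for i, token in enumerate(tokens):
--         if token[1] == 'double_quote':
--             if not in_string:
--                 if (i > 0 and tokens[i-1][1] == 'backslash'):
--                     continue
--                 in_string = True
--                 string = token[0]
--                 pos = i
--             else:
--                 string += token[0]
--                 in_string = False
--                 tokens[pos] = (string, 'string')
--                 # move the rest of the tokens back
--                 for _ in range(i-pos):
--                     tokens[pos+1] = None
--                     pos += 1
--                 string = ''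
--         elif in_string:
--             string += token[0]
--     tokens = [t for t in tokens if t is not None]
--     return tokens
-- ===== SOURCE B (Python) =====
-- # B: single pass building the output directly with a pending buffer; no in-place
-- # mutation (A mutates its argument; equivalence here is about the return value only)
-- # and no final filtering pass. Objective: simpler.
-- def join_strings(tokens):
--     out = []
--     pending = []
--     prev = None
--     for tok in tokens:
--         if pending:
--             pending.append(tok)
--             if tok[1] == 'double_quote':
--                 out.append((''.join(t[0] for t in pending), 'string'))
--                 pending = []
--         elif tok[1] == 'double_quote' and (prev is None or prev[1] != 'backslash'):
--             pending = [tok]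
--         else:
--             out.append(tok)
--         prev = tok
--     out.extend(pending)
--     return out
-- ===== Notes on version B (the rewrite author's own statement) =====
-- stated objective: simpler
-- what changed: A simulates the in-place mutation: it rewrites the opening token to the merged string, overwrites the interior tokens with None while tracking positions, and needs a final filtering pass; B builds the output list directly in one pass with a pending buffer of tokens since the open quote, with no mutation, no position bookkeeping and no filter pass (B does not mutate its argument; A does).
import Mathlib
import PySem

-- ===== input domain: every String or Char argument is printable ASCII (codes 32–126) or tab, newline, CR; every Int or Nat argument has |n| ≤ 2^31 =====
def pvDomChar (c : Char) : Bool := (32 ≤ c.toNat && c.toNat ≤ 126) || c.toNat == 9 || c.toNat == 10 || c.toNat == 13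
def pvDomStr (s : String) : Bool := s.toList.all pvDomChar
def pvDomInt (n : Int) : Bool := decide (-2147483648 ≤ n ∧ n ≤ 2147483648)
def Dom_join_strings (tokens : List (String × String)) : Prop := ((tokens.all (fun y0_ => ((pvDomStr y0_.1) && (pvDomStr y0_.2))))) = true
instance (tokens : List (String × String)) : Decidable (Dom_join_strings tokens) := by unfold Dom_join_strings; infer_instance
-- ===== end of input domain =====

-- B builds the output directly in one pass with a pending buffer (no in-place mutation,
-- no final filter pass); A mutates its argument in place, B does not — the equivalence
-- proved here is about the RETURN value only. Objective: simpler.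

-- ===== PORT A =====
-- the inner `for _ in range(i-pos): tokens[pos+1] = None; pos += 1` loop
def pvBlankLoop : Nat → Nat → List (Option (String × String)) → List (Option (String × String))
  | 0, _, l => l
  | k+1, pos, l => pvBlankLoop k (pos+1) (l.set (pos+1) none)

-- the `for i, token in enumerate(tokens)` loop over the live (mutated) list;
-- where Python raises (subscripting a None entry), the port just returns (excluded by Pre_)
def pvJoinALoop : Nat → Nat → List (Option (String × String)) → Bool → String → Nat → List (Option (String × String))
  | 0, _, l, _, _, _ => l
  | rem+1, i, l, inS, s, pos =>
    match l[i]? with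
    | none => l
    | some none => l  -- Python: token[1] on None raises TypeError; unreachable on inputs in Pre_
    | some (some tok) =>
      if tok.2 == "double_quote" then
        if !inS then
          if 0 < i && (match l[i-1]? with | some (some p) => p.2 == "backslash" | _ => false) then
            pvJoinALoop rem (i+1) l inS s pos
          else
            pvJoinALoop rem (i+1) l true tok.1 i
        else
          pvJoinALoop rem (i+1)
            (pvBlankLoop (i - pos) pos (l.set pos (some (s ++ tok.1, "string"))))
            false "" i
      else if inS then
        pvJoinALoop rem (i+1) l inS (s ++ tok.1) pos
      else
        pvJoinALoop rem (i+1) l inS s pos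

def join_strings (tokens : List (String × String)) : List (String × String) :=
  (pvJoinALoop tokens.length 0 (tokens.map some) false "" 0).filterMap id

-- ===== PORT B =====
def pvJoinBLoop : List (String × String) → List (String × String) → List (String × String) →
    Option (String × String) → List (String × String)
  | [], out, pending, _ => out ++ pending
  | tok :: rest, out, pending, prev =>
    if pending ≠ [] then
      if tok.2 == "double_quote" then
        pvJoinBLoop rest (out ++ [((pending ++ [tok]).foldl (fun a t => a ++ t.1) "", "string")]) [] (some tok)
      else
        pvJoinBLoop rest out (pending ++ [tok]) (some tok)
    else if tok.2 == "double_quote" && (match prev with | none => true | some p => !(p.2 == "backslash")) then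
      pvJoinBLoop rest out [tok] (some tok)
    else
      pvJoinBLoop rest (out ++ [tok]) [] (some tok)

def join_strings_alt (tokens : List (String × String)) : List (String × String) :=
  pvJoinBLoop tokens [] [] none

-- ===== PRECONDITION & SPEC =====
-- grammar-level scanner deciding whether A returns: it tracks only whether the scan is
-- inside a string literal and whether the previous token is a backslash (the escape rule);
-- it returns false exactly when a closing quote is immediately followed by a double_quote
-- token.  It computes no output and shares nothing with either port.
def pvScan : Bool → Bool → List (String × String) → Bool
  | _, _, [] => true
  | inS, pb, t :: r =>
    if inS then
      if t.2 == "double_quote" then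
        match r with
        | [] => true
        | u :: _ => if u.2 == "double_quote" then false else pvScan false false r
      else pvScan true false r
    else
      if t.2 == "double_quote" then
        if pb then pvScan false false r else pvScan true false r
      else pvScan false (t.2 == "backslash") r

-- Pre_ excludes exactly the inputs on which A raises TypeError: those where a token typed
-- "double_quote" immediately follows the closing quote of a merged string (A then
-- subscripts the None it wrote while merging).  On every input where A returns, Pre_ holds.
def Pre_join_strings (tokens : List (String × String)) : Prop :=
  pvScan false false tokens = true
instance (tokens : List (String × String)) : Decidable (Pre_join_strings tokens) := by
  unfold Pre_join_strings; infer_instance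

def pvWitness_join_strings : (List (String × String)) :=
  [("\"", "double_quote"), ("hi", "word"), ("\"", "double_quote"), ("x", "word")]

def Spec_join_strings (tokens : List (String × String)) (out : List (String × String)) : Prop := out = join_strings_alt tokens
instance (tokens : List (String × String)) (out : List (String × String)) : Decidable (Spec_join_strings tokens out) := by unfold Spec_join_strings; infer_instance

-- ===== CLAIM (what is proved, stated in full; the proofs are below) =====
def Claim_equal_join_strings : Prop := ∀ (tokens : List (String × String)), Dom_join_strings tokens → Pre_join_strings tokens → Spec_join_strings tokens (join_strings tokens)

-- ===== LEMMAS AND PROOFS =====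

-- invariant linking A's processed prefix (with its rewrites) to B's previous original token
-- and the scanner's backslash flag: either nothing was processed yet, or the last processed
-- cell holds the previous token unchanged, or it is a None written by a merge and the
-- previous token was the closing quote
def pvLOk (keep : List (Option (String × String))) (prev : Option (String × String)) (pb : Bool) : Prop :=
  (keep = [] ∧ prev = none ∧ pb = false) ∨
  ∃ p, prev = some p ∧
    ((keep.getLast? = some (some p) ∧ pb = (p.2 == "backslash")) ∨
     (keep.getLast? = some none ∧ p.2 = "double_quote" ∧ pb = false))

theorem pvJoinB_out (rest : List (String × String)) :
    ∀ out pending prev, pvJoinBLoop rest out pending prev = out ++ pvJoinBLoop rest [] pending prev := by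
  induction rest with
  | nil => intro out pending prev; simp [pvJoinBLoop]
  | cons tok r ih =>
    intro out pending prev
    simp only [pvJoinBLoop]
    split_ifs <;> rw [ih] <;> first
      | rfl
      | (rw [ih ([] ++ _)]; simp)

theorem pvBlank_spec (mid : List (Option (String × String))) :
    ∀ (pre suf : List (Option (String × String))) (pos : Nat), pre.length = pos + 1 →
    pvBlankLoop mid.length pos (pre ++ (mid ++ suf)) = pre ++ (List.replicate mid.length none ++ suf) := by
  induction mid with
  | nil => intro pre suf pos h; simp [pvBlankLoop]
  | cons m0 mtail ih =>
    intro pre suf pos h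
    have hset : (pre ++ (m0 :: (mtail ++ suf))).set (pos+1) none
        = (pre ++ [none]) ++ (mtail ++ suf) := by
      rw [List.set_append_right _ _ (by omega)]
      have h0 : pos + 1 - pre.length = 0 := by omega
      simp [h0]
    simp only [List.length_cons, List.cons_append, pvBlankLoop]
    rw [hset, ih (pre ++ [none]) suf (pos+1) (by simp [h])]
    simp [List.replicate_succ]

mutual
theorem pvL1 (rest : List (String × String)) (keep : List (Option (String × String)))
    (prev : Option (String × String)) (s : String) (pos : Nat) (pb : Bool)
    (hs : pvScan false pb rest = true) (hk : pvLOk keep prev pb)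
    (hnq : keep.getLast? = some none → ∀ u, rest.head? = some u → (u.2 == "double_quote") = false) :
    (pvJoinALoop rest.length keep.length (keep ++ rest.map some) false s pos).filterMap id
      = keep.filterMap id ++ pvJoinBLoop rest [] [] prev := by
  cases rest with
  | nil => simp [pvJoinALoop, pvJoinBLoop]
  | cons tok r =>
    have hget : (keep ++ (tok :: r).map some)[keep.length]? = some (some tok) := by
      rw [List.getElem?_append_right (le_refl _)]; simp
    simp only [List.length_cons, pvJoinALoop, hget]
    by_cases hq : tok.2 = "double_quote"
    · have hqb : (tok.2 == "double_quote") = true := by simpa using hq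
      rcases hk with ⟨hke, hpe, hpb⟩ | ⟨p, hpe, hlast⟩
      · -- first token of the list: i = 0, the guard is false, a string opens
        subst hke; subst hpe; subst hpb
        have hs' : pvScan true false r = true := by simpa [pvScan, hqb] using hs
        have h2 := pvL2 r [] [tok] (some tok) hs' (by simp)
        simp only [pvJoinBLoop] at h2 ⊢
        simpa [hqb, String.empty_append] using h2
      · subst hpe
        have hkn : keep ≠ [] := by
          intro h
          rcases hlast with ⟨h1, _⟩ | ⟨h1, _, _⟩ <;> simp [h] at h1
        have hkl : (decide (0 < keep.length)) = true := by
          cases keep with | nil => exact absurd rfl hkn | cons a l => simp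
        have hprev : (keep ++ (tok :: r).map some)[keep.length - 1]? = keep.getLast? := by
          rw [List.getElem?_append_left (by cases keep <;> simp_all)]
          rw [List.getLast?_eq_getElem?]
        rcases hlast with ⟨hlast, hpb⟩ | ⟨hlast, hpq, hpb⟩
        · -- previous cell holds the previous token unchanged
          by_cases hb : p.2 = "backslash"
          · -- escaped quote: A continues, B keeps the token
            have hbb : (p.2 == "backslash") = true := by simpa using hb
            have hs' : pvScan false false r = true := by
              simpa [pvScan, hqb, hpb, hbb] using hs
            have h1 := pvL1 r (keep ++ [some tok]) (some tok) s pos false hs'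
              (Or.inr ⟨tok, rfl, Or.inl ⟨List.getLast?_concat, by simp [hq]⟩⟩)
              (by intro h; rw [List.getLast?_concat] at h; simp at h)
            simp only [List.length_append, List.length_cons, List.length_nil,
              List.append_assoc, List.singleton_append] at h1
            simp only [pvJoinBLoop, hqb, hprev, hlast, hbb, hkl, Bool.not_false,
              Bool.true_and, Bool.and_true, if_true, ne_eq,
              not_true_eq_false, reduceCtorEq, if_false]
            rw [pvJoinB_out _ ([] ++ [tok])]
            simpa using h1
          · -- a string opens here
            have hbb : (p.2 == "backslash") = false := by simpa using hb
            have hs' : pvScan true false r = true := by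
              simpa [pvScan, hqb, hpb, hbb] using hs
            have h2 := pvL2 r keep [tok] (some tok) hs' (by simp)
            simp only [pvJoinBLoop, hqb, hprev, hlast, hbb, hkl, Bool.and_false,
              if_false, Bool.true_and, if_true, ne_eq,
              not_true_eq_false, reduceCtorEq] at h2 ⊢
            simpa [String.empty_append] using h2
        · -- previous cell is a None written by a merge: Pre_ forbids a quote right after
          exact absurd hqb (by simpa using hnq hlast tok rfl)
    · -- not a quote: while not in_string A skips it, B copies it to the output
      have hqne : (tok.2 == "double_quote") = false := by simpa using hq
      have hs' : pvScan false (tok.2 == "backslash") r = true := by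
        simpa [pvScan, hqne] using hs
      have hk' : pvLOk (keep ++ [some tok]) (some tok) (tok.2 == "backslash") :=
        Or.inr ⟨tok, rfl, Or.inl ⟨List.getLast?_concat, rfl⟩⟩
      have h1 := pvL1 r (keep ++ [some tok]) (some tok) s pos (tok.2 == "backslash") hs' hk'
        (by intro h; rw [List.getLast?_concat] at h; simp at h)
      simp only [List.length_append, List.length_cons, List.length_nil,
        List.append_assoc, List.singleton_append] at h1
      simp only [pvJoinBLoop, hqne, Bool.false_and]
      rw [pvJoinB_out _ ([] ++ [tok])]
      simpa using h1

theorem pvL2 (rest : List (String × String)) (keep : List (Option (String × String)))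
    (span : List (String × String)) (prev : Option (String × String))
    (hs : pvScan true false rest = true) (hsp : span ≠ []) :
    (pvJoinALoop rest.length (keep.length + span.length) ((keep ++ span.map some) ++ rest.map some)
        true (span.foldl (fun a t => a ++ t.1) "") keep.length).filterMap id
      = keep.filterMap id ++ pvJoinBLoop rest [] span prev := by
  cases rest with
  | nil =>
    simp [pvJoinALoop, pvJoinBLoop]
  | cons tok r =>
    obtain ⟨sp0, sptl, rfl⟩ : ∃ a l, span = a :: l := by
      cases span with | nil => exact absurd rfl hsp | cons a l => exact ⟨a, l, rfl⟩
    have hlen : (keep ++ ((sp0 :: sptl).map some)).length = keep.length + (sp0 :: sptl).length := by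
      simp
    have hget : ((keep ++ (sp0 :: sptl).map some) ++ (tok :: r).map some)[keep.length + (sp0 :: sptl).length]? = some (some tok) := by
      rw [← hlen, List.getElem?_append_right (le_refl _)]; simp
    simp only [List.length_cons] at hget
    simp only [List.length_cons, pvJoinALoop, hget]
    by_cases hq : tok.2 = "double_quote"
    · -- closing quote: A merges in place and blanks the interior, B emits the merged token
      have hqb : (tok.2 == "double_quote") = true := by simpa using hq
      -- extract from the scanner: the next token (if any) is not a quote, and the scan goes on
      have hrest : (∀ u, r.head? = some u → (u.2 == "double_quote") = false)
          ∧ pvScan false false r = true := by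
        cases r with
        | nil => exact ⟨by intro u h; simp at h, rfl⟩
        | cons u ru =>
          by_cases hu : (u.2 == "double_quote") = true
          · exfalso; simp [pvScan, hqb, hu] at hs
          · refine ⟨by intro v hv; simp at hv; subst hv; simpa using hu, ?_⟩
            simpa [pvScan, hqb, hu] using hs
      simp only [hqb, Bool.not_true, reduceIte]
      have hsub : keep.length + (sptl.length + 1) - keep.length = (sptl.map some ++ [some tok]).length := by
        simp
      have hset : ((keep ++ (sp0 :: sptl).map some) ++ (tok :: r).map some).set keep.length
            (some ((sp0 :: sptl).foldl (fun a t => a ++ t.1) "" ++ tok.1, "string"))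
          = (keep ++ [some ((sp0 :: sptl).foldl (fun a t => a ++ t.1) "" ++ tok.1, "string")])
            ++ ((sptl.map some ++ [some tok]) ++ r.map some) := by
        rw [List.append_assoc, List.set_append_right _ _ (le_refl _)]
        simp
      rw [hsub, hset,
        pvBlank_spec (sptl.map some ++ [some tok]) _ (r.map some) keep.length (by simp)]
      have hlast2 : ((keep ++ [some ((sp0 :: sptl).foldl (fun a t => a ++ t.1) "" ++ tok.1, "string")])
            ++ List.replicate (sptl.length + 1) (none : Option (String × String))).getLast? = some none := by
        induction sptl.length with
        | zero => simp [List.replicate_succ]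
        | succ n ihn => rw [List.replicate_succ', ← List.append_assoc, List.getLast?_concat]
      have h1 := pvL1 r
        ((keep ++ [some ((sp0 :: sptl).foldl (fun a t => a ++ t.1) "" ++ tok.1, "string")])
          ++ List.replicate (sptl.length + 1) none) (some tok) "" (keep.length + (sptl.length + 1)) false
        hrest.2
        (Or.inr ⟨tok, rfl, Or.inr ⟨hlast2, hq, rfl⟩⟩)
        (by intro _ u hu; exact hrest.1 u hu)
      simp only [List.length_append, List.length_replicate, List.length_cons,
        List.length_nil] at h1
      rw [show keep.length + 1 + (sptl.length + 1) = keep.length + (sptl.length + 1) + 1 by omega] at h1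
      have hmidlen : (List.map some sptl ++ [some tok]).length = sptl.length + 1 := by simp
      rw [hmidlen]
      have hBstep : pvJoinBLoop (tok :: r) [] (sp0 :: sptl) prev
          = [((sp0 :: sptl).foldl (fun a t => a ++ t.1) "" ++ tok.1, "string")]
            ++ pvJoinBLoop r [] [] (some tok) := by
        simp only [pvJoinBLoop, hqb, ne_eq, reduceCtorEq, not_false_eq_true, if_pos]
        rw [pvJoinB_out]
        simp [List.foldl_append]
      rw [hBstep]
      simpa [List.append_assoc] using h1
    · -- ordinary token inside a string: A appends to the buffer, B to pending
      have hqne : (tok.2 == "double_quote") = false := by simpa using hq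
      have hs' : pvScan true false r = true := by simpa [pvScan, hqne] using hs
      simp only [hqne, Bool.false_eq_true, reduceIte]
      have h2 := pvL2 r keep ((sp0 :: sptl) ++ [tok]) (some tok) hs' (by simp)
      simp only [List.foldl_append, List.length_append, List.length_cons, List.length_nil,
        List.map_append, List.append_assoc, List.map_cons, List.map_nil] at h2
      rw [show keep.length + (sptl.length + 1 + 1) = keep.length + (sptl.length + 1) + 1 by omega] at h2
      have hBstep : pvJoinBLoop (tok :: r) [] (sp0 :: sptl) prev
          = pvJoinBLoop r [] ((sp0 :: sptl) ++ [tok]) (some tok) := by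
        simp only [pvJoinBLoop, hqne, Bool.false_eq_true, reduceIte, ne_eq, reduceCtorEq,
          not_false_eq_true, if_pos]
      rw [hBstep]
      simpa [List.append_assoc] using h2
end

-- ===== VERDICT (by name: the statement is the Claim_ definition above) =====
theorem join_strings_spec : Claim_equal_join_strings := by
  intro tokens _ hpre
  unfold Spec_join_strings join_strings join_strings_alt
  have := pvL1 tokens [] none "" 0 false hpre (Or.inl ⟨rfl, rfl, rfl⟩)
    (by intro h; simp at h)
  simpa using this
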